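-- pv_equiv track=rewrite | github.com/suqi95716aa/suqi95716aa | test3.py | merge_dicts_by_name
-- ===== SOURCE A (Python) =====
-- def merge_dicts_by_name(dict_list):
--     merged_dict = {}
--
--     for d in dict_list:
--         name = d['name']
--         desc = d['desc']
--
--         if name in merged_dict:
--             merged_dict[name]['desc'] += '<SEP>' + desc
--         else:
--             merged_dict[name] = {'name': name, 'desc': desc}
--
--     # 将合并后的字典转换为列表
--     merged_list = list(merged_dict.values())
--     return merged_list
-- ===== SOURCE B (Python) =====
-- def merge_dicts_by_name(dict_list):
--     result = []
--     rest = dict_list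
--     while rest:
--         name = rest[0]['name']
--         result.append({'name': name,
--                        'desc': '<SEP>'.join(d['desc'] for d in rest if d['name'] == name)})
--         rest = [d for d in rest if d['name'] != name]
--     return result
-- ===== Notes on version B (the rewrite author's own statement) =====
-- stated objective: alternative
-- what changed: B uses no dict at all: it repeatedly extracts the whole group of the first remaining name (scan-collect its descs, join once, then drop all its entries) until the list is exhausted, instead of A's single left-to-right pass over a hash map with in-place string '+=' on the stored entry.
import Mathlib
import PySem

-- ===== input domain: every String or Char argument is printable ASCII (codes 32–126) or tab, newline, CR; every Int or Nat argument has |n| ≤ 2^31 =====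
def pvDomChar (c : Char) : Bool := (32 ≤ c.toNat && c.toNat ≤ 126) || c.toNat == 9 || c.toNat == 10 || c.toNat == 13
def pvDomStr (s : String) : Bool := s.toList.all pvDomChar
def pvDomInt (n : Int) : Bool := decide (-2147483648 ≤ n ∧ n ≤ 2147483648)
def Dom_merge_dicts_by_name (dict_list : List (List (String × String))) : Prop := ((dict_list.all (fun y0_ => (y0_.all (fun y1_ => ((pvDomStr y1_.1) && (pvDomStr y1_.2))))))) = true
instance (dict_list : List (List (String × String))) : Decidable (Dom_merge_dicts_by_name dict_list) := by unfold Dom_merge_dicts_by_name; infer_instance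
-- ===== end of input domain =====

-- B drops the dict entirely: it repeatedly extracts the whole group of the first remaining name
-- (collect its descs, join once, drop its entries) until the list is empty, instead of A's
-- single hash-map pass with in-place string '+='.


-- d['name'] / d['desc'] ported as getD with a dummy default — Pre_ excludes the inputs
-- (an inner dict missing the 'name' or 'desc' key) on which Python raises KeyError,
-- so the default is never read.
def pvName (d : List (String × String)) : String := (PySem.Dict.mk d).getD "name" ""
def pvDesc (d : List (String × String)) : String := (PySem.Dict.mk d).getD "desc" ""

-- ===== PORT A =====
-- loop body of A
def pvStepA (m : PySem.Dict String (PySem.Dict String String)) (d : List (String × String)) :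
    PySem.Dict String (PySem.Dict String String) :=
  let name := pvName d
  let desc := pvDesc d
  if m.contains name then
    -- merged_dict[name]['desc'] += '<SEP>' + desc
    m.modify name (PySem.Dict.mk []) (fun inner =>
      inner.modify "desc" "" (fun s => s ++ "<SEP>" ++ desc))
  else
    m.insert name (PySem.Dict.mk [("name", name), ("desc", desc)])

def merge_dicts_by_name (dict_list : List (List (String × String))) : List (List (String × String)) :=
  ((dict_list.foldl pvStepA (PySem.Dict.mk [])).values).map PySem.Dict.items

-- ===== PORT B =====
-- B's while loop: rest shrinks by the whole group of its first name; result accumulates one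
-- output row per extracted group.
def pvLoopB (acc : List (List (String × String))) :
    List (List (String × String)) → List (List (String × String))
  | [] => acc
  | d :: t =>
    pvLoopB
      (acc ++ [[("name", pvName d),
                ("desc", PySem.Str.join "<SEP>"
                  (((d :: t).filter (fun e => pvName e == pvName d)).map pvDesc))]])
      ((d :: t).filter (fun e => !(pvName e == pvName d)))
  termination_by l => l.length
  decreasing_by
    simp only [List.filter_cons, BEq.rfl, Bool.not_true, List.length_cons]
    exact Nat.lt_succ_of_le (List.length_filter_le _ _)

def merge_dicts_by_name_alt (dict_list : List (List (String × String))) : List (List (String × String)) :=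
  pvLoopB [] dict_list

-- ===== PRECONDITION & SPEC =====
-- Pre_ excludes exactly the inputs on which Python A raises KeyError: an inner dict without a 'name' or 'desc' key.
def Pre_merge_dicts_by_name (dict_list : List (List (String × String))) : Prop :=
  ∀ d ∈ dict_list, "name" ∈ d.map Prod.fst ∧ "desc" ∈ d.map Prod.fst
instance (dict_list : List (List (String × String))) : Decidable (Pre_merge_dicts_by_name dict_list) := by unfold Pre_merge_dicts_by_name; infer_instance

def pvWitness_merge_dicts_by_name : (List (List (String × String))) :=
  [[("name", "a"), ("desc", "x")], [("name", "b"), ("desc", "y")], [("name", "a"), ("desc", "z")]]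

def Spec_merge_dicts_by_name (dict_list : List (List (String × String))) (out : List (List (String × String))) : Prop := out = merge_dicts_by_name_alt dict_list
instance (dict_list : List (List (String × String))) (out : List (List (String × String))) : Decidable (Spec_merge_dicts_by_name dict_list out) := by unfold Spec_merge_dicts_by_name; infer_instance

-- ===== CLAIM (what is proved, stated in full; the proofs are below) =====
def Claim_equal_merge_dicts_by_name : Prop := ∀ (dict_list : List (List (String × String))), Dom_merge_dicts_by_name dict_list → Pre_merge_dicts_by_name dict_list → Spec_merge_dicts_by_name dict_list (merge_dicts_by_name dict_list)

-- ===== LEMMAS AND PROOFS =====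

-- first-occurrence order of the names of l
def pvFo : List (List (String × String)) → List String
  | [] => []
  | d :: t => pvName d :: pvFo (t.filter (fun e => !(pvName e == pvName d)))
  termination_by l => l.length
  decreasing_by
    simp only [List.length_cons, List.length_unattach]
    exact Nat.lt_succ_of_le (le_trans (List.length_filter_le _ _) (by simp))

-- all descriptions carried by name n in l, in order
def pvDFor (l : List (List (String × String))) (n : String) : List String :=
  (l.filter (fun e => pvName e == n)).map pvDesc

-- the entry A stores for name n once all of l is processed
def pvEntry (l : List (List (String × String))) (n : String) : PySem.Dict String String :=
  PySem.Dict.mk [("name", n), ("desc", PySem.Str.join "<SEP>" (pvDFor l n))]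

def pvSpec (l : List (List (String × String))) : List (String × PySem.Dict String String) :=
  (pvFo l).map (fun n => (n, pvEntry l n))

lemma pvMem_map_filter_name (t : List (List (String × String))) (m n : String) :
    n ∈ (t.filter (fun e => !(pvName e == m))).map pvName ↔ (n ∈ t.map pvName ∧ n ≠ m) := by
  constructor
  · intro h
    obtain ⟨e, he, rfl⟩ := List.mem_map.1 h
    have := List.mem_filter.1 he
    exact ⟨List.mem_map.2 ⟨e, this.1, rfl⟩, by simpa using this.2⟩
  · rintro ⟨h, hne⟩
    obtain ⟨e, he, rfl⟩ := List.mem_map.1 h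
    exact List.mem_map.2 ⟨e, List.mem_filter.2 ⟨he, by simpa using hne⟩, rfl⟩

lemma pvMem_fo (l : List (List (String × String))) (n : String) :
    n ∈ pvFo l ↔ n ∈ l.map pvName := by
  induction l using pvFo.induct with
  | case1 => simp [pvFo]
  | case2 d t ih =>
    simp only [List.unattach_filter, List.unattach_attach] at ih
    rw [pvFo]
    simp only [List.mem_cons, List.map_cons, ih, pvMem_map_filter_name]
    by_cases h : n = pvName d <;> simp [h]

lemma pvNodup_fo (l : List (List (String × String))) : (pvFo l).Nodup := by
  induction l using pvFo.induct with
  | case1 => simp [pvFo]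
  | case2 d t ih =>
    simp only [List.unattach_filter, List.unattach_attach] at ih
    rw [pvFo]
    refine List.nodup_cons.2 ⟨fun hmem => ?_, ih⟩
    rw [pvMem_fo, pvMem_map_filter_name] at hmem
    exact hmem.2 rfl

lemma pvFo_append (l : List (List (String × String))) (d : List (String × String)) :
    pvFo (l ++ [d]) = if pvName d ∈ l.map pvName then pvFo l else pvFo l ++ [pvName d] := by
  induction l using pvFo.induct with
  | case1 => simp [pvFo]
  | case2 e t ih =>
    simp only [List.unattach_filter, List.unattach_attach] at ih
    rw [List.cons_append, pvFo, pvFo, List.filter_append]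
    by_cases hd : pvName d = pvName e
    · simp [hd]
    · have hfilter : List.filter (fun x => !(pvName x == pvName e)) [d] = [d] := by
        simp [hd]
      rw [hfilter, ih]
      simp only [pvMem_map_filter_name]
      by_cases hm : pvName d ∈ t.map pvName <;> simp [hm, hd]

lemma pvJoinChars_append (sep : List Char) (ls : List (List Char)) (l : List Char) (h : ls ≠ []) :
    PySem.Chars.join sep (ls ++ [l]) = PySem.Chars.join sep ls ++ sep ++ l := by
  induction ls with
  | nil => cases h rfl
  | cons a rest ih =>
    cases rest with
    | nil => simp [PySem.Chars.join_cons_cons, PySem.Chars.join_singleton]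
    | cons b rest' =>
      rw [List.cons_append, List.cons_append, PySem.Chars.join_cons_cons sep a b (rest' ++ [l]),
        PySem.Chars.join_cons_cons sep a b rest', ← List.cons_append, ih (by simp)]
      simp

lemma pvJoin_append (xs : List String) (x : String) (h : xs ≠ []) :
    PySem.Str.join "<SEP>" (xs ++ [x]) = PySem.Str.join "<SEP>" xs ++ "<SEP>" ++ x := by
  apply String.toList_injective
  rw [PySem.Str.toList_join]
  simp only [List.map_append, List.map_cons, List.map_nil]
  rw [pvJoinChars_append _ _ _ (by simpa using h)]
  simp [PySem.Str.toList_join]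

lemma pvJoin_singleton (x : String) : PySem.Str.join "<SEP>" [x] = x := by
  apply String.toList_injective
  rw [PySem.Str.toList_join]
  simp [PySem.Chars.join_singleton]

lemma pvDFor_append (l : List (List (String × String))) (d : List (String × String)) (n : String) :
    pvDFor (l ++ [d]) n = pvDFor l n ++ if pvName d == n then [pvDesc d] else [] := by
  by_cases h : pvName d == n <;> simp [pvDFor, List.filter_append, h]

lemma pvDFor_ne_nil (l : List (List (String × String))) (n : String)
    (h : n ∈ l.map pvName) : pvDFor l n ≠ [] := by
  simp only [pvDFor, ne_eq, List.map_eq_nil_iff, List.filter_eq_nil_iff]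
  intro hall
  obtain ⟨d, hd, hn⟩ := List.mem_map.1 h
  exact hall d hd (by simp [hn])

lemma pvDFor_nil_of_not_mem (l : List (List (String × String))) (n : String)
    (h : n ∉ l.map pvName) : pvDFor l n = [] := by
  simp only [pvDFor, List.map_eq_nil_iff, List.filter_eq_nil_iff]
  intro d hd
  simp only [beq_iff_eq]
  exact fun hn => h (List.mem_map.2 ⟨d, hd, hn⟩)

lemma pvDFor_cons_ne (d : List (String × String)) (t : List (List (String × String))) (n : String)
    (h : n ≠ pvName d) : pvDFor (d :: t) n = pvDFor t n := by
  simp [pvDFor, Ne.symm h]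

lemma pvDFor_filter_ne (t : List (List (String × String))) (m n : String) (h : n ≠ m) :
    pvDFor (t.filter (fun e => !(pvName e == m))) n = pvDFor t n := by
  unfold pvDFor
  rw [List.filter_filter]
  congr 1
  refine List.filter_congr (fun e _ => ?_)
  by_cases he : pvName e = n
  · simp [he, h]
  · simp [he]

lemma pvEntry_append_ne (l : List (List (String × String))) (d : List (String × String)) (n : String)
    (h : n ≠ pvName d) : pvEntry (l ++ [d]) n = pvEntry l n := by
  unfold pvEntry
  rw [pvDFor_append]
  simp [Ne.symm h]

-- A's accumulator after processing l is exactly pvSpec l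
lemma pvItemsA (l : List (List (String × String))) :
    (l.foldl pvStepA (PySem.Dict.mk [])).items = pvSpec l := by
  induction l using List.reverseRecOn with
  | nil => simp [pvSpec, pvFo]
  | append_singleton l d ih =>
    rw [List.foldl_append, List.foldl_cons, List.foldl_nil]
    set m := l.foldl pvStepA (PySem.Dict.mk []) with hm
    have hkeys : m.keys = pvFo l := by
      simp only [PySem.Dict.keys, ih, pvSpec, List.map_map]
      exact List.map_id _
    have hnodup : m.keys.Nodup := by rw [hkeys]; exact pvNodup_fo l
    have hcont : m.contains (pvName d) = decide (pvName d ∈ l.map pvName) := by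
      rw [PySem.Dict.contains_eq_decide_mem_keys, hkeys]
      simp [pvMem_fo]
    by_cases hmem : pvName d ∈ l.map pvName
    · have hc : m.contains (pvName d) = true := by rw [hcont]; exact decide_eq_true hmem
      have hitem : (pvName d, pvEntry l (pvName d)) ∈ m.items := by
        rw [ih]
        exact List.mem_map.2 ⟨pvName d, (pvMem_fo l _).2 hmem, rfl⟩
      have hgetD : m.getD (pvName d) (PySem.Dict.mk []) = pvEntry l (pvName d) :=
        PySem.Dict.getD_of_mem_items m hitem hnodup _
      have hinner : (pvEntry l (pvName d)).modify "desc" "" (fun s => s ++ "<SEP>" ++ pvDesc d)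
          = pvEntry (l ++ [d]) (pvName d) := by
        unfold pvEntry
        rw [pvDFor_append]
        simp only [BEq.rfl, if_true]
        rw [pvJoin_append _ _ (pvDFor_ne_nil l _ hmem)]
        simp [PySem.Dict.modify, PySem.Dict.insert, PySem.Dict.getD, PySem.Dict.get?,
          PySem.Dict.contains]
      have hstep : pvStepA m d = m.insert (pvName d) (pvEntry (l ++ [d]) (pvName d)) := by
        rw [← hinner]
        simp only [pvStepA, hc, if_true, PySem.Dict.modify, hgetD]
      rw [hstep, PySem.Dict.items_insert_of_contains m _ hc, ih]
      unfold pvSpec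
      rw [pvFo_append]
      simp only [hmem, if_true, List.map_map]
      refine List.map_congr_left (fun n hn => ?_)
      by_cases hnd : n = pvName d
      · subst hnd; simp
      · simp only [Function.comp]
        rw [if_neg (by simpa using hnd), pvEntry_append_ne l d n hnd]
    · have hc : m.contains (pvName d) = false := by rw [hcont]; exact decide_eq_false hmem
      have hstep : pvStepA m d
          = m.insert (pvName d) (PySem.Dict.mk [("name", pvName d), ("desc", pvDesc d)]) := by
        simp only [pvStepA, hc]
        simp
      rw [hstep, PySem.Dict.items_insert_of_not_contains m _ hc, ih]
      unfold pvSpec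
      rw [pvFo_append]
      simp only [hmem, if_false, List.map_append]
      congr 1
      · refine List.map_congr_left (fun n hn => ?_)
        have hnd : n ≠ pvName d := by
          intro h; exact hmem (h ▸ (pvMem_fo l n).1 hn)
        rw [pvEntry_append_ne l d n hnd]
      · simp [pvEntry, pvDFor_append, pvDFor_nil_of_not_mem l _ hmem, pvJoin_singleton]

lemma pvLoopB_acc_aux : ∀ (k : Nat) (l : List (List (String × String)))
    (acc1 acc2 : List (List (String × String))), l.length ≤ k →
    pvLoopB (acc1 ++ acc2) l = acc1 ++ pvLoopB acc2 l := by
  intro k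
  induction k with
  | zero =>
    intro l acc1 acc2 h
    have : l = [] := List.eq_nil_of_length_eq_zero (Nat.le_zero.1 h)
    subst this
    simp [pvLoopB]
  | succ k ih =>
    intro l acc1 acc2 h
    cases l with
    | nil => simp [pvLoopB]
    | cons d t =>
      rw [pvLoopB, pvLoopB]
      have hrec : ((d :: t).filter (fun e => !(pvName e == pvName d))).length ≤ k := by
        have hfc : (d :: t).filter (fun e => !(pvName e == pvName d))
            = t.filter (fun e => !(pvName e == pvName d)) := by
          simp
        rw [hfc]
        exact le_trans (List.length_filter_le _ _) (by simpa [Nat.lt_succ_iff] using h)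
      rw [List.append_assoc]
      exact ih _ _ _ hrec

lemma pvLoopB_acc (l : List (List (String × String))) (acc : List (List (String × String))) :
    pvLoopB acc l = acc ++ pvLoopB [] l := by
  have := pvLoopB_acc_aux l.length l acc [] le_rfl
  simpa using this

lemma pvLoopB_spec (l : List (List (String × String))) :
    pvLoopB [] l =
      (pvFo l).map (fun n => [("name", n), ("desc", PySem.Str.join "<SEP>" (pvDFor l n))]) := by
  induction l using pvFo.induct with
  | case1 => simp [pvLoopB, pvFo]
  | case2 d t ih =>
    simp only [List.unattach_filter, List.unattach_attach] at ih
    have hfc : (d :: t).filter (fun e => !(pvName e == pvName d))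
        = t.filter (fun e => !(pvName e == pvName d)) := by
      simp
    rw [pvLoopB, hfc, List.nil_append, pvLoopB_acc, ih, pvFo, List.map_cons,
      List.singleton_append]
    congr 1
    refine List.map_congr_left (fun n hn => ?_)
    have hmem := (pvMem_fo _ n).1 hn
    rw [pvMem_map_filter_name] at hmem
    rw [pvDFor_filter_ne t _ n hmem.2, pvDFor_cons_ne d t n hmem.2]

-- ===== VERDICT (by name: the statement is the Claim_ definition above) =====
theorem merge_dicts_by_name_spec : Claim_equal_merge_dicts_by_name := by
  intro dict_list _ _
  unfold Spec_merge_dicts_by_name merge_dicts_by_name merge_dicts_by_name_alt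
  rw [pvLoopB_spec]
  simp only [PySem.Dict.values, pvItemsA, pvSpec, List.map_map]
  rfl
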